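-- pv_equiv track=rewrite | github.com/avas888/LIA_Graph | src/lia_graph/vigencia_extractor.py | _norm_id_acceptance_needle
-- ===== SOURCE A (Python) =====
-- def _norm_id_acceptance_needle(norm_id: str) -> str | None:
--     """Return the integer (or dotted DUR article) that must appear in the
--     fetched body for single-source acceptance.
--
--     * `et.art.<MMM>[...]`                       → `<MMM>` (article number)
--     * `ley.<NNN>.<YYYY>.art.<MMM>[...]`         → `<MMM>` (article number)
--     * `ley.<NNN>.<YYYY>`                        → `<NNN>` (law number)
--     * `decreto.<NNN>.<YYYY>.art.<A.B.C.D...>`   → `<A.B.C.D...>` (full DUR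
--       article path joined with dots — matches `[[ART:A.B.C.D]]` markers
--       injected by the DIAN scraper, AND matches plain dotted spans in the
--       decreto body. Falls back to the shorter form when only one segment.)
--     * `decreto.<NNN>.<YYYY>`                    → `<NNN>` (decreto number)
--     * `res.dian.<NN>.<YYYY>.art.<MMM>[...]`     → `<MMM>` (article number)
--     * `res.dian.<NN>.<YYYY>`                    → `<NN>` (resolution number)
--     * `concepto.dian.<num>[.num.<NN>...]`       → `<num>` (concepto identifier)
--     * Anything else                              → None (caller refuses).
--     """
--
--     parts = norm_id.split(".")
--     if ".art." in norm_id: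
--         try:
--             idx = parts.index("art")
--         except ValueError:
--             return None
--         # Consume all numeric segments after `art` so DUR-style articles
--         # like `1.1.1.4.10` get matched as a unit (the legacy single-segment
--         # path returned just "1", which is too permissive but harmless).
--         article_segments: list[str] = []
--         for seg in parts[idx + 1:]:
--             if seg.isdigit():
--                 article_segments.append(seg)
--             else:
--                 break
--         if not article_segments:
--             return None
--         return ".".join(article_segments)
--     if norm_id.startswith("ley.") and len(parts) >= 3:
--         candidate = parts[1]
--         if candidate.isdigit():
--             return candidate
--     if norm_id.startswith("decreto.") and len(parts) >= 3:
--         candidate = parts[1]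
--         if candidate.isdigit():
--             return candidate
--     if norm_id.startswith("res.dian.") and len(parts) >= 4:
--         candidate = parts[2]
--         if candidate.isdigit():
--             return candidate
--     if norm_id.startswith("concepto.dian.") and len(parts) >= 3:
--         # Conceptos may carry suffixes like `0001-2003` or `100208192-202` —
--         # the bare identifier alone is enough; if DIAN's body talks about it
--         # at all, that string will appear.
--         return parts[2]
--     return None
-- ===== SOURCE B (Python) =====
-- def _norm_id_acceptance_needle(norm_id: str) -> str | None:
--     parts = norm_id.split(".")
--     if ".art." in norm_id:
--         return _art_needle(parts)
--     match parts:
--         case ["ley", num, _, *_] if num.isdigit():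
--             return num
--         case ["decreto", num, _, *_] if num.isdigit():
--             return num
--         case ["res", "dian", num, _, *_] if num.isdigit():
--             return num
--         case ["concepto", "dian", num, *_]:
--             return num
--     return None
--
--
-- def _art_needle(parts):
--     """Skip segments until the first 'art', then take the digit run after it."""
--     if not parts:
--         return None
--     if parts[0] != "art":
--         return _art_needle(parts[1:])
--     run = _digit_run(parts[1:])
--     return ".".join(run) if run else None
--
--
-- def _digit_run(parts):
--     if parts and parts[0].isdigit():
--         return [parts[0]] + _digit_run(parts[1:])
--     return []
-- ===== Notes on version B (the rewrite author's own statement) =====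
-- stated objective: alternative
-- what changed: Prefix dispatch is done by structural pattern-matching on the split segment list (no startswith/length tests on the raw string), and the art branch is a single recursion that skips to the first 'art' segment and takes the digit run, replacing try/except index + slice + loop.
import Mathlib
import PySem

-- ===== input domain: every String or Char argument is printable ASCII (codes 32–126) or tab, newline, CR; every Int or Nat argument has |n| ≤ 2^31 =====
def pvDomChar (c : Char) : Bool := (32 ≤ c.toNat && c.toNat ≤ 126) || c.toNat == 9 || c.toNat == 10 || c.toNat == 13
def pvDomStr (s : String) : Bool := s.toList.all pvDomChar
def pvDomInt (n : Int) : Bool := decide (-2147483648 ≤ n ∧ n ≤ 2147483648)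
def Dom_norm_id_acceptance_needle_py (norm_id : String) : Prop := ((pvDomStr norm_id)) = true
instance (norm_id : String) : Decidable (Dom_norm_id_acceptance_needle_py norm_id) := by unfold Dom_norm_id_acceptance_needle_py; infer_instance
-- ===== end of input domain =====

-- B dispatches the prefix rules by structural pattern-matching on the split segment
-- list and replaces A's index/slice/loop art branch by one recursion (alternative).

-- ===== PORT A =====

-- A's `for seg in parts[idx+1:]: if seg.isdigit(): append else break`
def pvCollectDigits : List String → List String
  | [] => []
  | s :: rest =>
    if PySem.Str.strIsdigit s then s :: pvCollectDigits rest else []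

def norm_id_acceptance_needle_py (norm_id : String) : Option String :=
  let parts := (PySem.Str.split? norm_id ".").getD []
  if PySem.Str.isIn ".art." norm_id then
    match PySem.List.index? parts "art" with
    | none => none
    | some idx =>
      let segs := pvCollectDigits (PySem.List.slice parts (some ((idx : Int) + 1)) none)
      if segs = [] then none else some (PySem.Str.join "." segs)
  else
    -- the four sequential `if` blocks, each falling through when its digit test fails
    if PySem.Str.startswith norm_id "ley." && decide (3 ≤ parts.length) &&
        PySem.Str.strIsdigit (PySem.List.pyGetD parts 1 "") then
      some (PySem.List.pyGetD parts 1 "")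
    else if PySem.Str.startswith norm_id "decreto." && decide (3 ≤ parts.length) &&
        PySem.Str.strIsdigit (PySem.List.pyGetD parts 1 "") then
      some (PySem.List.pyGetD parts 1 "")
    else if PySem.Str.startswith norm_id "res.dian." && decide (4 ≤ parts.length) &&
        PySem.Str.strIsdigit (PySem.List.pyGetD parts 2 "") then
      some (PySem.List.pyGetD parts 2 "")
    else if PySem.Str.startswith norm_id "concepto.dian." && decide (3 ≤ parts.length) then
      some (PySem.List.pyGetD parts 2 "")
    else
      none

-- ===== PORT B =====

-- B's `_digit_run`
def pvDigitRun : List String → List String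
  | [] => []
  | s :: rest => if PySem.Str.strIsdigit s then s :: pvDigitRun rest else []

-- B's `_art_needle`
def pvArtNeedle : List String → Option String
  | [] => none
  | p :: rest =>
    if p ≠ "art" then pvArtNeedle rest
    else
      let run := pvDigitRun rest
      if run = [] then none else some (PySem.Str.join "." run)

def norm_id_acceptance_needle_py_alt (norm_id : String) : Option String :=
  let parts := (PySem.Str.split? norm_id ".").getD []
  if PySem.Str.isIn ".art." norm_id then
    pvArtNeedle parts
  else
    -- Python's match/case on `parts`; a failed guard falls through, but the pattern
    -- heads are mutually exclusive, so `else none` inside an arm is exact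
    match parts with
    | "ley" :: num :: _ :: _ =>
      if PySem.Str.strIsdigit num then some num else none
    | "decreto" :: num :: _ :: _ =>
      if PySem.Str.strIsdigit num then some num else none
    | "res" :: "dian" :: num :: _ :: _ =>
      if PySem.Str.strIsdigit num then some num else none
    | "concepto" :: "dian" :: num :: _ => some num
    | _ => none

-- ===== PRECONDITION & SPEC =====
def Spec_norm_id_acceptance_needle_py (norm_id : String) (out : Option String) : Prop := out = norm_id_acceptance_needle_py_alt norm_id
instance (norm_id : String) (out : Option String) : Decidable (Spec_norm_id_acceptance_needle_py norm_id out) := by unfold Spec_norm_id_acceptance_needle_py; infer_instance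

-- ===== CLAIM =====
def Claim_equal_norm_id_acceptance_needle_py : Prop := ∀ (norm_id : String), Dom_norm_id_acceptance_needle_py norm_id → Spec_norm_id_acceptance_needle_py norm_id (norm_id_acceptance_needle_py norm_id)

-- ===== LEMMAS AND PROOFS =====
def pvSp : List Char → List (List Char)
  | [] => [[]]
  | c :: rest =>
    if c = '.' then [] :: pvSp rest
    else
      match pvSp rest with
      | [] => [[c]]
      | h :: t => (c :: h) :: t
def pvConsH (x : List Char) : List (List Char) → List (List Char)
  | [] => [x]
  | h :: t => (x ++ h) :: t
theorem pvSp_ne_nil (cs : List Char) : pvSp cs ≠ [] := by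
  cases cs with
  | nil => simp [pvSp]
  | cons c rest =>
    simp only [pvSp]
    split
    · simp
    · split <;> simp

theorem pvGo (fuel : Nat) :
    ∀ (l cur : List Char) (accs : List (List Char)),
      l.length < fuel →
      PySem.Chars.splitOn.go ['.'] fuel l cur accs =
        accs.reverse ++ pvConsH cur.reverse (pvSp l) := by
  induction fuel with
  | zero => intro l cur accs h; omega
  | succ fuel ih =>
    intro l cur accs h
    cases l with
    | nil =>
      simp [PySem.Chars.splitOn.go, pvSp, pvConsH]
    | cons c rest =>
      rw [PySem.Chars.splitOn.go]
      by_cases hc : c = '.'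
      · subst hc
        have hpre : ['.'].isPrefixOf ('.' :: rest) = true := by simp [List.isPrefixOf]
        rw [if_pos hpre]
        simp only [List.length_cons] at h
        rw [ih _ _ _ (by simpa using h)]
        obtain ⟨h0, t0, hst⟩ : ∃ h0 t0, pvSp rest = h0 :: t0 := by
          cases hs : pvSp rest with
          | nil => exact absurd hs (pvSp_ne_nil rest)
          | cons a b => exact ⟨a, b, rfl⟩
        simp [pvSp, pvConsH, hst]
      · have hpre : ['.'].isPrefixOf (c :: rest) = false := by
          simp [List.isPrefixOf]; exact fun hh => absurd hh.symm hc
        rw [if_neg (by simp [hpre])]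
        simp only [List.length_cons] at h
        rw [ih _ _ _ (by omega)]
        obtain ⟨h0, t0, hst⟩ : ∃ h0 t0, pvSp rest = h0 :: t0 := by
          cases hs : pvSp rest with
          | nil => exact absurd hs (pvSp_ne_nil rest)
          | cons a b => exact ⟨a, b, rfl⟩
        simp [pvSp, pvConsH, hst, hc]

theorem pvSplitOn_eq_sp (cs : List Char) :
    PySem.Chars.splitOn cs ['.'] = pvSp cs := by
  rw [PySem.Chars.splitOn, pvGo _ _ _ _ (by omega)]
  obtain ⟨h0, t0, hst⟩ : ∃ h0 t0, pvSp cs = h0 :: t0 := by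
    cases hs : pvSp cs with
    | nil => exact absurd hs (pvSp_ne_nil cs)
    | cons a b => exact ⟨a, b, rfl⟩
  simp [pvConsH, hst]

theorem pvParts_eq (s : String) :
    (PySem.Str.split? s ".").getD [] = (pvSp s.toList).map String.ofList := by
  rw [PySem.Str.split?]
  have : PySem.Chars.split? s.toList ".".toList = some (pvSp s.toList) := by
    rw [PySem.Chars.split?]
    norm_num
    exact ⟨by decide, by simpa using pvSplitOn_eq_sp s.toList⟩
  rw [this]
  rfl

theorem pvSp_append (p rest : List Char) (hp : '.' ∉ p) :
    pvSp (p ++ '.' :: rest) = p :: pvSp rest := by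
  induction p with
  | nil => simp [pvSp]
  | cons a p ih =>
    have ha : a ≠ '.' := fun h => hp (h ▸ List.mem_cons_self ..)
    have hp' : '.' ∉ p := fun h => hp (List.mem_cons_of_mem _ h)
    simp [pvSp, ha, ih hp']

theorem pvSp_cons (cs : List Char) : ∀ (h : List Char) (t : List (List Char)),
    pvSp cs = h :: t → t ≠ [] →
    ∃ rest, cs = h ++ '.' :: rest ∧ pvSp rest = t := by
  induction cs with
  | nil => intro h t hcs ht; simp [pvSp] at hcs; simp [hcs.2] at ht
  | cons c rest ih =>
    intro h t hcs ht
    by_cases hc : c = '.'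
    · subst hc
      simp [pvSp] at hcs
      exact ⟨rest, by simp [hcs.1], hcs.2⟩
    · obtain ⟨h0, t0, hst⟩ : ∃ h0 t0, pvSp rest = h0 :: t0 := by
        cases hs : pvSp rest with
        | nil => exact absurd hs (pvSp_ne_nil rest)
        | cons a b => exact ⟨a, b, rfl⟩
      rw [pvSp, if_neg hc, hst] at hcs
      obtain ⟨rfl, rfl⟩ : c :: h0 = h ∧ t0 = t := by
        exact ⟨by injection hcs, by injection hcs⟩
      obtain ⟨r, hr1, hr2⟩ := ih h0 t0 hst ht
      exact ⟨r, by simp [hr1], hr2⟩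

theorem pvStart_iff (s : String) (p : List Char) (hp : '.' ∉ p) :
    PySem.Str.startswith s (String.ofList (p ++ ['.'])) = true ↔
      ∃ t, pvSp s.toList = p :: t ∧ t ≠ [] := by
  rw [PySem.Str.startswith_eq]
  constructor
  · intro h
    rw [PySem.Chars.startswith_iff] at h
    obtain ⟨r, hr⟩ := h
    simp at hr
    rw [← hr, pvSp_append _ _ hp]
    exact ⟨pvSp r, rfl, pvSp_ne_nil r⟩
  · rintro ⟨t, hst, ht⟩
    obtain ⟨rest, hcs, -⟩ := pvSp_cons s.toList p t hst ht
    rw [PySem.Chars.startswith_iff]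
    refine ⟨rest, ?_⟩
    simp [hcs]

theorem pvStart2_iff (s : String) (p q : List Char) (hp : '.' ∉ p) (hq : '.' ∉ q) :
    PySem.Str.startswith s (String.ofList (p ++ '.' :: (q ++ ['.']))) = true ↔
      ∃ t, pvSp s.toList = p :: q :: t ∧ t ≠ [] := by
  rw [PySem.Str.startswith_eq]
  constructor
  · intro h
    rw [PySem.Chars.startswith_iff] at h
    obtain ⟨r, hr⟩ := h
    simp at hr
    rw [← hr, pvSp_append _ _ hp, pvSp_append _ _ hq]
    exact ⟨pvSp r, rfl, pvSp_ne_nil r⟩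
  · rintro ⟨t, hst, ht⟩
    obtain ⟨rest, hcs, hrest⟩ := pvSp_cons s.toList p (q :: t) hst (by simp)
    obtain ⟨rest2, hcs2, -⟩ := pvSp_cons rest q t hrest ht
    rw [PySem.Chars.startswith_iff]
    refine ⟨rest2, ?_⟩
    simp [hcs, hcs2]


theorem pvDigitRun_eq (l : List String) : pvDigitRun l = pvCollectDigits l := by
  induction l with
  | nil => rfl
  | cons s rest ih => simp only [pvDigitRun, pvCollectDigits, ih]

theorem pvArt_eq (parts : List String) :
    (match PySem.List.index? parts "art" with
      | none => (none : Option String)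
      | some idx =>
        let segs := pvCollectDigits (PySem.List.slice parts (some ((idx : Int) + 1)) none)
        if segs = [] then none else some (PySem.Str.join "." segs)) =
    pvArtNeedle parts := by
  induction parts with
  | nil => simp [PySem.List.index?, pvArtNeedle]
  | cons p rest ih =>
    by_cases hp : p = "art"
    · subst hp
      rw [show (match PySem.List.index? ("art" :: rest) "art" with
        | none => (none : Option String)
        | some idx =>
          let segs := pvCollectDigits (PySem.List.slice ("art" :: rest) (some ((idx : Int) + 1)) none)
          if segs = [] then none else some (PySem.Str.join "." segs)) =
        (let segs := pvCollectDigits (PySem.List.slice ("art" :: rest) (some (((0 : Nat) : Int) + 1)) none)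
         if segs = [] then none else some (PySem.Str.join "." segs)) from by
          rw [PySem.List.index?_cons_self]]
      simp [PySem.List.slice_from_one, pvArtNeedle, pvDigitRun_eq]
    · rw [PySem.List.index?_cons_of_ne rest hp, pvArtNeedle, if_pos hp]
      rw [← ih]
      cases hidx : PySem.List.index? rest "art" with
      | none => simp
      | some idx =>
        simp only [Option.map_some]
        have hs : PySem.List.slice (p :: rest) (some ((idx + 1 : Nat) + 1 : Int)) none =
            PySem.List.slice rest (some ((idx : Int) + 1)) none := by
          push_cast
          rw [show ((idx : Int) + 1 + 1) = ((idx + 2 : Nat) : Int) by push_cast; ring,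
              show ((idx : Int) + 1) = ((idx + 1 : Nat) : Int) by push_cast; ring,
              PySem.List.slice_from_natCast, PySem.List.slice_from_natCast]
          simp [List.drop_succ_cons]
        push_cast at hs ⊢
        rw [hs]

theorem pvMapToList (P : List (List Char)) (L : List String)
    (h : P.map String.ofList = L) : P = L.map String.toList := by
  subst h
  rw [List.map_map]
  conv_lhs => rw [show P = P.map id from (List.map_id P).symm]
  apply List.map_congr_left
  intro a _
  simp

theorem pvPrefix_eq (s : String) :
    (if PySem.Str.startswith s "ley." && decide (3 ≤ ((pvSp s.toList).map String.ofList).length) &&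
        PySem.Str.strIsdigit (PySem.List.pyGetD ((pvSp s.toList).map String.ofList) 1 "") then
      some (PySem.List.pyGetD ((pvSp s.toList).map String.ofList) 1 "")
    else if PySem.Str.startswith s "decreto." && decide (3 ≤ ((pvSp s.toList).map String.ofList).length) &&
        PySem.Str.strIsdigit (PySem.List.pyGetD ((pvSp s.toList).map String.ofList) 1 "") then
      some (PySem.List.pyGetD ((pvSp s.toList).map String.ofList) 1 "")
    else if PySem.Str.startswith s "res.dian." && decide (4 ≤ ((pvSp s.toList).map String.ofList).length) &&
        PySem.Str.strIsdigit (PySem.List.pyGetD ((pvSp s.toList).map String.ofList) 2 "") then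
      some (PySem.List.pyGetD ((pvSp s.toList).map String.ofList) 2 "")
    else if PySem.Str.startswith s "concepto.dian." && decide (3 ≤ ((pvSp s.toList).map String.ofList).length) then
      some (PySem.List.pyGetD ((pvSp s.toList).map String.ofList) 2 "")
    else
      none) =
    (match (pvSp s.toList).map String.ofList with
    | "ley" :: num :: _ :: _ =>
      if PySem.Str.strIsdigit num then some num else none
    | "decreto" :: num :: _ :: _ =>
      if PySem.Str.strIsdigit num then some num else none
    | "res" :: "dian" :: num :: _ :: _ =>
      if PySem.Str.strIsdigit num then some num else none
    | "concepto" :: "dian" :: num :: _ => some num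
    | _ => none) := by
  have hley : PySem.Str.startswith s "ley." = true ↔ ∃ t, pvSp s.toList = "ley".toList :: t ∧ t ≠ [] := by
    rw [show ("ley." : String) = String.ofList ("ley".toList ++ ['.']) from by decide]
    exact pvStart_iff s "ley".toList (by decide)
  have hdec : PySem.Str.startswith s "decreto." = true ↔ ∃ t, pvSp s.toList = "decreto".toList :: t ∧ t ≠ [] := by
    rw [show ("decreto." : String) = String.ofList ("decreto".toList ++ ['.']) from by decide]
    exact pvStart_iff s "decreto".toList (by decide)
  have hres : PySem.Str.startswith s "res.dian." = true ↔ ∃ t, pvSp s.toList = "res".toList :: "dian".toList :: t ∧ t ≠ [] := by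
    rw [show ("res.dian." : String) = String.ofList ("res".toList ++ '.' :: ("dian".toList ++ ['.'])) from by decide]
    exact pvStart2_iff s "res".toList "dian".toList (by decide) (by decide)
  have hcon : PySem.Str.startswith s "concepto.dian." = true ↔ ∃ t, pvSp s.toList = "concepto".toList :: "dian".toList :: t ∧ t ≠ [] := by
    rw [show ("concepto.dian." : String) = String.ofList ("concepto".toList ++ '.' :: ("dian".toList ++ ['.'])) from by decide]
    exact pvStart2_iff s "concepto".toList "dian".toList (by decide) (by decide)
  symm
  split
  next num x xs heq =>
    have hP := pvMapToList _ _ heq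
    have hl : PySem.Str.startswith s "ley." = true :=
      hley.mpr ⟨_, by simpa using hP, by simp⟩
    have hd : PySem.Str.startswith s "decreto." = false := by
      rw [Bool.eq_false_iff]; intro hc
      obtain ⟨t, ht, -⟩ := hdec.mp hc
      have heq' := heq
      rw [ht] at heq'
      simp only [List.map] at heq'
      injection heq' with hh _
      exact absurd hh (by decide)
    have hr : PySem.Str.startswith s "res.dian." = false := by
      rw [Bool.eq_false_iff]; intro hc
      obtain ⟨t, ht, -⟩ := hres.mp hc
      have heq' := heq
      rw [ht] at heq'
      simp only [List.map] at heq'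
      injection heq' with hh _
      exact absurd hh (by decide)
    have hk : PySem.Str.startswith s "concepto.dian." = false := by
      rw [Bool.eq_false_iff]; intro hc
      obtain ⟨t, ht, -⟩ := hcon.mp hc
      have heq' := heq
      rw [ht] at heq'
      simp only [List.map] at heq'
      injection heq' with hh _
      exact absurd hh (by decide)
    rw [heq, hl, hd, hr, hk,
        show (1:Int) = ((1:Nat):Int) from rfl, show (2:Int) = ((2:Nat):Int) from rfl,
        PySem.List.pyGetD_natCast, PySem.List.pyGetD_natCast]
    simp
  next num x xs heq =>
    have hP := pvMapToList _ _ heq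
    have hl : PySem.Str.startswith s "ley." = false := by
      rw [Bool.eq_false_iff]; intro hc
      obtain ⟨t, ht, -⟩ := hley.mp hc
      have heq' := heq
      rw [ht] at heq'
      simp only [List.map] at heq'
      injection heq' with hh _
      exact absurd hh (by decide)
    have hd : PySem.Str.startswith s "decreto." = true :=
      hdec.mpr ⟨_, by simpa using hP, by simp⟩
    have hr : PySem.Str.startswith s "res.dian." = false := by
      rw [Bool.eq_false_iff]; intro hc
      obtain ⟨t, ht, -⟩ := hres.mp hc
      have heq' := heq
      rw [ht] at heq'
      simp only [List.map] at heq'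
      injection heq' with hh _
      exact absurd hh (by decide)
    have hk : PySem.Str.startswith s "concepto.dian." = false := by
      rw [Bool.eq_false_iff]; intro hc
      obtain ⟨t, ht, -⟩ := hcon.mp hc
      have heq' := heq
      rw [ht] at heq'
      simp only [List.map] at heq'
      injection heq' with hh _
      exact absurd hh (by decide)
    rw [heq, hl, hd, hr, hk,
        show (1:Int) = ((1:Nat):Int) from rfl, show (2:Int) = ((2:Nat):Int) from rfl,
        PySem.List.pyGetD_natCast, PySem.List.pyGetD_natCast]
    simp
  next num x xs heq =>
    have hP := pvMapToList _ _ heq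
    have hl : PySem.Str.startswith s "ley." = false := by
      rw [Bool.eq_false_iff]; intro hc
      obtain ⟨t, ht, -⟩ := hley.mp hc
      have heq' := heq
      rw [ht] at heq'
      simp only [List.map] at heq'
      injection heq' with hh _
      exact absurd hh (by decide)
    have hd : PySem.Str.startswith s "decreto." = false := by
      rw [Bool.eq_false_iff]; intro hc
      obtain ⟨t, ht, -⟩ := hdec.mp hc
      have heq' := heq
      rw [ht] at heq'
      simp only [List.map] at heq'
      injection heq' with hh _
      exact absurd hh (by decide)
    have hr : PySem.Str.startswith s "res.dian." = true :=
      hres.mpr ⟨_, by simpa using hP, by simp⟩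
    have hk : PySem.Str.startswith s "concepto.dian." = false := by
      rw [Bool.eq_false_iff]; intro hc
      obtain ⟨t, ht, -⟩ := hcon.mp hc
      have heq' := heq
      rw [ht] at heq'
      simp only [List.map] at heq'
      injection heq' with hh _
      exact absurd hh (by decide)
    rw [heq, hl, hd, hr, hk,
        show (1:Int) = ((1:Nat):Int) from rfl, show (2:Int) = ((2:Nat):Int) from rfl,
        PySem.List.pyGetD_natCast, PySem.List.pyGetD_natCast]
    simp
  next num xs heq =>
    have hP := pvMapToList _ _ heq
    have hl : PySem.Str.startswith s "ley." = false := by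
      rw [Bool.eq_false_iff]; intro hc
      obtain ⟨t, ht, -⟩ := hley.mp hc
      have heq' := heq
      rw [ht] at heq'
      simp only [List.map] at heq'
      injection heq' with hh _
      exact absurd hh (by decide)
    have hd : PySem.Str.startswith s "decreto." = false := by
      rw [Bool.eq_false_iff]; intro hc
      obtain ⟨t, ht, -⟩ := hdec.mp hc
      have heq' := heq
      rw [ht] at heq'
      simp only [List.map] at heq'
      injection heq' with hh _
      exact absurd hh (by decide)
    have hr : PySem.Str.startswith s "res.dian." = false := by
      rw [Bool.eq_false_iff]; intro hc
      obtain ⟨t, ht, -⟩ := hres.mp hc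
      have heq' := heq
      rw [ht] at heq'
      simp only [List.map] at heq'
      injection heq' with hh _
      exact absurd hh (by decide)
    have hk : PySem.Str.startswith s "concepto.dian." = true :=
      hcon.mpr ⟨_, by simpa using hP, by simp⟩
    rw [heq, hl, hd, hr, hk,
        show (1:Int) = ((1:Nat):Int) from rfl, show (2:Int) = ((2:Nat):Int) from rfl,
        PySem.List.pyGetD_natCast, PySem.List.pyGetD_natCast]
    simp
  next h1 h2 h3 h4 =>
    symm
    split_ifs with hc1 hc2 hc3 hc4
    · exfalso
      simp only [Bool.and_eq_true, decide_eq_true_eq] at hc1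
      obtain ⟨⟨hs1, hlen⟩, -⟩ := hc1
      obtain ⟨t, hsp, -⟩ := hley.mp hs1
      rw [hsp] at hlen
      simp only [List.map, List.length_cons, List.length_map] at hlen
      rcases t with _ | ⟨a, _ | ⟨b, r⟩⟩ <;> (simp at hlen; try omega)
      exact h1 (String.ofList a) (String.ofList b) (r.map String.ofList)
        (by rw [hsp]; simp)
    · exfalso
      simp only [Bool.and_eq_true, decide_eq_true_eq] at hc2
      obtain ⟨⟨hs1, hlen⟩, -⟩ := hc2
      obtain ⟨t, hsp, -⟩ := hdec.mp hs1
      rw [hsp] at hlen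
      simp only [List.map, List.length_cons, List.length_map] at hlen
      rcases t with _ | ⟨a, _ | ⟨b, r⟩⟩ <;> (simp at hlen; try omega)
      exact h2 (String.ofList a) (String.ofList b) (r.map String.ofList)
        (by rw [hsp]; simp)
    · exfalso
      simp only [Bool.and_eq_true, decide_eq_true_eq] at hc3
      obtain ⟨⟨hs1, hlen⟩, -⟩ := hc3
      obtain ⟨t, hsp, -⟩ := hres.mp hs1
      rw [hsp] at hlen
      simp only [List.map, List.length_cons, List.length_map] at hlen
      rcases t with _ | ⟨a, _ | ⟨b, r⟩⟩ <;> (simp at hlen; try omega)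
      exact h3 (String.ofList a) (String.ofList b) (r.map String.ofList)
        (by rw [hsp]
            simp)
    · exfalso
      simp only [Bool.and_eq_true, decide_eq_true_eq] at hc4
      obtain ⟨hs1, -⟩ := hc4
      obtain ⟨t, hsp, htne⟩ := hcon.mp hs1
      rcases t with _ | ⟨a, r⟩
      · exact htne rfl
      · exact h4 (String.ofList a) (r.map String.ofList)
          (by rw [hsp]
              simp)
    · rfl

theorem norm_id_acceptance_needle_py_spec_aux (s : String) :
    norm_id_acceptance_needle_py s = norm_id_acceptance_needle_py_alt s := by
  unfold norm_id_acceptance_needle_py norm_id_acceptance_needle_py_alt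
  simp only [pvParts_eq]
  by_cases hart : PySem.Str.isIn ".art." s = true
  · rw [if_pos hart, if_pos hart]
    exact pvArt_eq _
  · rw [if_neg hart, if_neg hart]
    exact pvPrefix_eq s

-- ===== VERDICT =====
theorem norm_id_acceptance_needle_py_spec : Claim_equal_norm_id_acceptance_needle_py := by
  intro s _
  exact norm_id_acceptance_needle_py_spec_aux s
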